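-- pv_equiv track=rewrite | github.com/amyasnikov/validity | validity/compliance/serialization/routeros.py | non_quoted_characters
-- ===== SOURCE A (Python) =====
-- from typing import Generator, Literal
--
-- def non_quoted_characters(line: str) -> Generator[tuple[int, str], None, None]:
--     """
--     Generator returns pairs (char_position, char) for each char in line not placed inside the quotes
--     Quoted substring will be returned as 1 single character with char_position equal to first character
--     """
--
--     quote_open = False
--     quote_start = -1
--     for i, char in enumerate(line):
--         if char == '"' and (not i or line[i - 1] != "\\"):
--             quote_open = not quote_open
--             if quote_open:
--                 quote_start = i
--             else:
--                 yield i, line[quote_start : i + 1]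
--             continue
--         if quote_open:
--             continue
--         yield i, char
-- ===== SOURCE B (Python) =====
-- def non_quoted_characters(line):
--     """Index-driven scan: outside quotes yield (i, char); on an unescaped quote
--     search forward for the unescaped closing quote and yield it as one chunk."""
--     i = 0
--     n = len(line)
--     while i < n:
--         if line[i] == '"' and (i == 0 or line[i - 1] != "\\"):
--             j = i + 1
--             while j < n and not (line[j] == '"' and line[j - 1] != "\\"):
--                 j += 1
--             if j >= n:
--                 return  # unterminated quote: nothing more is yielded
--             yield j, line[i : j + 1]
--             i = j + 1
--         else:
--             yield i, line[i]
--             i += 1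
-- ===== Notes on version B (the rewrite author's own statement) =====
-- stated objective: alternative
-- what changed: Replaces A's single pass with a toggling quote_open/quote_start state machine over enumerate(line) by an index-driven while loop that, on an unescaped quote, runs an inner forward search for the unescaped closing quote and emits the whole quoted chunk at once.
import Mathlib
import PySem

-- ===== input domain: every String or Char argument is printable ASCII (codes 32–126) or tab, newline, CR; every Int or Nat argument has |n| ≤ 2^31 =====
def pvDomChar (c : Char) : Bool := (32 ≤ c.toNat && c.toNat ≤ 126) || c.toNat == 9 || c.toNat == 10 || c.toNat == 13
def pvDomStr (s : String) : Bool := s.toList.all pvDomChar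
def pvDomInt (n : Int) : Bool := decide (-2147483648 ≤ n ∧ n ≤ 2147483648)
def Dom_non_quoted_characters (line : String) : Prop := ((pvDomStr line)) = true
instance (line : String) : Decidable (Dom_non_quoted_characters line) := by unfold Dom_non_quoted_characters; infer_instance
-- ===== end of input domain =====

-- B replaces A's toggling quote_open/quote_start state machine by an index-driven
-- scan with an inner search for the closing quote (objective: alternative decomposition).

-- ===== PORT A =====
-- enumerate(line), transliterated structurally
def pvEnumFrom (i : Nat) : List Char → List (Nat × Char)
  | [] => []
  | c :: cs => (i, c) :: pvEnumFrom (i + 1) cs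

-- the for-loop of A: state (quote_open, quote_start), consuming the enumerate list
def pvGoA (cs : List Char) : List (Nat × Char) → Bool → Int → List (Int × String)
  | [], _, _ => []
  | (i, c) :: rest, qopen, qstart =>
    if c == '"' && (i == 0 || !(cs.getD (i - 1) ' ' == '\\')) then
      if !qopen then pvGoA cs rest true (i : Int)
      else ((i : Int), String.ofList (PySem.List.slice cs (some qstart) (some ((i : Int) + 1)))) ::
             pvGoA cs rest false qstart
    else if qopen then pvGoA cs rest qopen qstart
    else ((i : Int), String.ofList [c]) :: pvGoA cs rest qopen qstart

def non_quoted_characters (line : String) : List (Int × String) :=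
  pvGoA line.toList (pvEnumFrom 0 line.toList) false (-1)

-- ===== PORT B =====
-- inner while loop of B: first j ≥ start with an unescaped quote
def pvFindClose (cs : List Char) (j : Nat) : Option Nat :=
  if j < cs.length then
    if cs.getD j ' ' == '"' && !(cs.getD (j - 1) ' ' == '\\') then some j
    else pvFindClose cs (j + 1)
  else none
termination_by cs.length - j

theorem pvFindClose_bounds (cs : List Char) :
    ∀ n j k, cs.length - j = n → pvFindClose cs j = some k → j ≤ k ∧ k < cs.length := by
  intro n
  induction n with
  | zero =>
    intro j k hn h
    rw [pvFindClose] at h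
    simp [show ¬ j < cs.length by omega] at h
  | succ m ih =>
    intro j k hn h
    rw [pvFindClose] at h
    by_cases hj : j < cs.length
    · simp only [if_pos hj] at h
      split_ifs at h with hc
      · cases h; exact ⟨le_refl _, hj⟩
      · have := ih (j + 1) k (by omega) h
        exact ⟨by omega, this.2⟩
    · simp [hj] at h

-- outer while loop of B
def pvGoB (cs : List Char) (i : Nat) : List (Int × String) :=
  if h : i < cs.length then
    if cs.getD i ' ' == '"' && (i == 0 || !(cs.getD (i - 1) ' ' == '\\')) then
      match hfc : pvFindClose cs (i + 1) with
      | some j =>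
          ((j : Int), String.ofList (PySem.List.slice cs (some (i : Int)) (some ((j : Int) + 1)))) ::
            pvGoB cs (j + 1)
      | none => []
    else ((i : Int), String.ofList [cs.getD i ' ']) :: pvGoB cs (i + 1)
  else []
termination_by cs.length - i
decreasing_by
  · have := pvFindClose_bounds cs (cs.length - (i + 1)) (i + 1) j rfl hfc
    omega
  · omega

def non_quoted_characters_alt (line : String) : List (Int × String) :=
  pvGoB line.toList 0

-- ===== PRECONDITION & SPEC =====
def Spec_non_quoted_characters (line : String) (out : List (Int × String)) : Prop := out = non_quoted_characters_alt line
instance (line : String) (out : List (Int × String)) : Decidable (Spec_non_quoted_characters line out) := by unfold Spec_non_quoted_characters; infer_instance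

-- ===== CLAIM (what is proved, stated in full; the proofs are below) =====
def Claim_equal_non_quoted_characters : Prop := ∀ (line : String), Dom_non_quoted_characters line → Spec_non_quoted_characters line (non_quoted_characters line)

-- ===== LEMMAS AND PROOFS =====

theorem pvGoB_stop (cs : List Char) (i : Nat) (h : ¬ i < cs.length) : pvGoB cs i = [] := by
  rw [pvGoB]; simp [h]

theorem pvGoB_quote (cs : List Char) (i : Nat) (h : i < cs.length)
    (hc : (cs.getD i ' ' == '"' && (i == 0 || !(cs.getD (i - 1) ' ' == '\\'))) = true) :
    pvGoB cs i =
      match pvFindClose cs (i + 1) with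
      | some j =>
          ((j : Int), String.ofList (PySem.List.slice cs (some (i : Int)) (some ((j : Int) + 1)))) ::
            pvGoB cs (j + 1)
      | none => [] := by
  rw [pvGoB]; simp only [dif_pos h, if_pos hc]
  cases hE : pvFindClose cs (i + 1) <;> simp

theorem pvGoB_char (cs : List Char) (i : Nat) (h : i < cs.length)
    (hc : ¬ (cs.getD i ' ' == '"' && (i == 0 || !(cs.getD (i - 1) ' ' == '\\'))) = true) :
    pvGoB cs i = ((i : Int), String.ofList [cs.getD i ' ']) :: pvGoB cs (i + 1) := by
  rw [pvGoB]; simp only [dif_pos h, if_neg hc]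

theorem pvEnumFrom_drop_succ (cs : List Char) (i : Nat) (h : i < cs.length) :
    pvEnumFrom i (cs.drop i) = (i, cs.getD i ' ') :: pvEnumFrom (i + 1) (cs.drop (i + 1)) := by
  rw [List.drop_eq_getElem_cons h, pvEnumFrom]
  simp [List.getD, List.getElem?_eq_getElem h]

-- main invariant: A's loop from position i in the unquoted state equals B's outer loop;
-- in the quoted state (opened at s) it equals the close-search followed by B's loop
theorem pvMain (cs : List Char) :
    ∀ n i, cs.length - i = n →
      (∀ s : Int, pvGoA cs (pvEnumFrom i (cs.drop i)) false s = pvGoB cs i) ∧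
      (∀ s : Nat, 1 ≤ i →
        pvGoA cs (pvEnumFrom i (cs.drop i)) true (s : Int) =
          match pvFindClose cs i with
          | some j =>
              ((j : Int), String.ofList (PySem.List.slice cs (some (s : Int)) (some ((j : Int) + 1)))) ::
                pvGoB cs (j + 1)
          | none => []) := by
  intro n
  induction n with
  | zero =>
    intro i hn
    have h : ¬ i < cs.length := by omega
    have hd : cs.drop i = [] := List.drop_eq_nil_of_le (by omega)
    have hfc : pvFindClose cs i = none := by rw [pvFindClose]; simp [h]
    refine ⟨fun s => ?_, fun s _ => ?_⟩
    · rw [hd, pvGoB_stop cs i h]; rfl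
    · rw [hd, hfc]; rfl
  | succ m ih =>
    intro i hn
    have h : i < cs.length := by omega
    have ihs := ih (i + 1) (by omega)
    have hstep := pvEnumFrom_drop_succ cs i h
    set c := cs.getD i ' ' with hc
    constructor
    · intro s
      by_cases hq : (c == '"' && (i == 0 || !(cs.getD (i - 1) ' ' == '\\'))) = true
      · -- quote opens at i
        rw [hstep]
        show pvGoA cs ((i, c) :: _) false s = _
        rw [pvGoA]
        simp only [hq, Bool.not_false, if_true]
        rw [ihs.2 i (by omega), pvGoB_quote cs i h hq]
      · rw [hstep]
        show pvGoA cs ((i, c) :: _) false s = _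
        rw [pvGoA]
        simp only [hq, Bool.false_eq_true, if_false]
        rw [pvGoB_char cs i h hq, ihs.1 s]
    · intro s hi1
      have hi0 : (i == 0) = false := by simp; omega
      by_cases hq : (c == '"' && (i == 0 || !(cs.getD (i - 1) ' ' == '\\'))) = true
      · -- unescaped quote closes here
        have hq' : (c == '"' && !(cs.getD (i - 1) ' ' == '\\')) = true := by
          rw [hi0] at hq; simpa using hq
        have hfc : pvFindClose cs i = some i := by
          rw [pvFindClose]; simp only [if_pos h, ← hc, hq', if_true]
        rw [hstep]
        show pvGoA cs ((i, c) :: _) true (s : Int) = _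
        rw [pvGoA]
        simp only [hq, Bool.not_true, Bool.false_eq_true, if_false, if_true]
        rw [hfc, ihs.1 (s : Int)]
      · -- not a closing quote: stay quoted
        have hq' : ¬ (c == '"' && !(cs.getD (i - 1) ' ' == '\\')) = true := by
          intro hcon
          exact hq (by rw [hi0]; simpa using hcon)
        have hfc : pvFindClose cs i = pvFindClose cs (i + 1) := by
          rw [pvFindClose]
          simp only [if_pos h, ← hc]
          rw [if_neg hq']
        rw [hstep]
        show pvGoA cs ((i, c) :: _) true (s : Int) = _
        rw [pvGoA]
        simp only [hq, Bool.false_eq_true, if_false, if_true]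
        rw [hfc, ihs.2 s (by omega)]

-- ===== VERDICT (by name: the statement is the Claim_ definition above) =====
theorem non_quoted_characters_spec : Claim_equal_non_quoted_characters := by
  intro line _
  unfold Spec_non_quoted_characters non_quoted_characters non_quoted_characters_alt
  have := (pvMain line.toList (line.toList.length - 0) 0 rfl).1 (-1)
  simpa using this
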